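-- pv_equiv track=rewrite | github.com/honi/uba-orga1 | Talleres/05-taller-interrupciones/common.py | removeLabels
-- ===== SOURCE A (Python) =====
-- def_DB  = ["DB"]
--
-- def removeLabels(tokens):
--     instCount=0
--     reserveLabel=':'
--     instructions=[]
--     labels={}
--     for t in tokens:
--         if len(t)<1:
--             return None, None
--         if len(t) > 1 and t[1]==reserveLabel:
--             labels[t[0]]=instCount
--             if len(t)>2:
--                 instructions=instructions+[t[2:]]
--                 if t[2] in def_DB:
--                     instCount=instCount+1
--                 else:
--                     instCount=instCount+2
--         else:
--             instructions=instructions+[t[0:]]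
--             if t[0] in def_DB:
--                 instCount=instCount+1
--             else:
--                 instCount=instCount+2
--     return instructions,labels
-- ===== SOURCE B (Python) =====
-- def_DB = ["DB"]
--
-- def removeLabels(tokens):
--     # Pass 1: collect instruction token-lists; record labels as (name, index into instructions).
--     instructions = []
--     pending = []
--     for t in tokens:
--         if len(t) < 1:
--             return None, None
--         if len(t) > 1 and t[1] == ':':
--             pending.append((t[0], len(instructions)))
--             if len(t) > 2:
--                 instructions.append(t[2:])
--         else:
--             instructions.append(t)
--     # Pass 2: prefix sums of instruction sizes give each index its address.
--     prefix = []
--     total = 0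
--     for inst in instructions:
--         prefix.append(total)
--         total += 1 if inst[0] in def_DB else 2
--     prefix.append(total)
--     labels = {}
--     for name, idx in pending:
--         labels[name] = prefix[idx]
--     return instructions, labels
-- ===== Notes on version B (the rewrite author's own statement) =====
-- stated objective: alternative
-- what changed: A resolves label addresses eagerly inside one loop that carries a running instCount; B is the classic two-pass assembler: first collect instruction slices and (name, index) label records, then compute a prefix-sum table of instruction sizes and resolve each label by table lookup.
import Mathlib
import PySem

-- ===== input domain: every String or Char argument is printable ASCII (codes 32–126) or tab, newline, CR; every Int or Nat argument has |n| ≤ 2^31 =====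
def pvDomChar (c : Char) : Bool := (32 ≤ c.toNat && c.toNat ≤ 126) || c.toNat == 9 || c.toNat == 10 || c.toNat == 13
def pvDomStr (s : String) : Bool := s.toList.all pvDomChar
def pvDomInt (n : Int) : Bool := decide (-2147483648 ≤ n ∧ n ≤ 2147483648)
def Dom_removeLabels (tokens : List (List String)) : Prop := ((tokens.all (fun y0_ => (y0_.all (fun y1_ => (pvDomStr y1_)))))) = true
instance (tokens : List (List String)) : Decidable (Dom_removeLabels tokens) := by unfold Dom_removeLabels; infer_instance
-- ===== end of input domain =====

-- B replaces A's single eager-address pass by the classic two-pass assembler split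
-- (collect instructions + label indices, then resolve addresses by prefix sums); objective: alternative decomposition.

-- ===== PORT A =====
-- A's single loop, carrying the running address instCount, the instructions and the label dict.
def removeLabelsLoopA (ts : List (List String)) (instCount : Int)
    (instructions : List (List String)) (labels : PySem.Dict String Int) :
    Option (List (List String)) × (Option (List (String × Int))) :=
  match ts with
  | [] => (some instructions, some labels.items)
  | t :: rest =>
    if t.length < 1 then (none, none)
    else if t.length > 1 ∧ PySem.List.pyGet? t 1 = some ":" then
      -- labels[t[0]] = instCount  (t[0] exists since len(t) ≥ 1 here)
      let labels' := labels.insert ((PySem.List.pyGet? t 0).getD "") instCount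
      if t.length > 2 then
        let instructions' := instructions ++ [PySem.List.slice t (some 2) none]
        if (PySem.List.pyGet? t 2).getD "" ∈ ["DB"] then
          removeLabelsLoopA rest (instCount + 1) instructions' labels'
        else
          removeLabelsLoopA rest (instCount + 2) instructions' labels'
      else
        removeLabelsLoopA rest instCount instructions labels'
    else
      let instructions' := instructions ++ [PySem.List.slice t (some 0) none]
      if (PySem.List.pyGet? t 0).getD "" ∈ ["DB"] then
        removeLabelsLoopA rest (instCount + 1) instructions' labels
      else
        removeLabelsLoopA rest (instCount + 2) instructions' labels

def removeLabels (tokens : List (List String)) : Option (List (List String)) × (Option (List (String × Int))) :=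
  removeLabelsLoopA tokens 0 [] PySem.Dict.empty

-- ===== PORT B =====
-- Pass 1 of Source B: collect instruction token-lists and (name, index) pending label records.
def collectB (ts : List (List String)) (instructions : List (List String))
    (pending : List (String × Nat)) :
    Option (List (List String) × List (String × Nat)) :=
  match ts with
  | [] => some (instructions, pending)
  | t :: rest =>
    if t.length < 1 then none
    else if t.length > 1 ∧ PySem.List.pyGet? t 1 = some ":" then
      let pending' := pending ++ [((PySem.List.pyGet? t 0).getD "", instructions.length)]
      if t.length > 2 then
        collectB rest (instructions ++ [PySem.List.slice t (some 2) none]) pending'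
      else
        collectB rest instructions pending'
    else
      collectB rest (instructions ++ [t]) pending

-- Pass 2 of Source B: prefix sums of instruction sizes (prefix has length |instructions| + 1).
def prefixB (instructions : List (List String)) : List Int :=
  let s := instructions.foldl
    (fun (s : List Int × Int) inst =>
      (s.1 ++ [s.2], s.2 + (if (PySem.List.pyGet? inst 0).getD "" ∈ ["DB"] then 1 else 2)))
    ([], 0)
  s.1 ++ [s.2]

def removeLabels_alt (tokens : List (List String)) : Option (List (List String)) × (Option (List (String × Int))) :=
  match collectB tokens [] [] with
  | none => (none, none)
  | some (instructions, pending) =>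
    let pref := prefixB instructions
    let labels := pending.foldl
      (fun (d : PySem.Dict String Int) ni => d.insert ni.1 ((PySem.List.pyGet? pref (ni.2 : Int)).getD 0))
      PySem.Dict.empty
    (some instructions, some labels.items)

-- ===== PRECONDITION & SPEC =====
def Spec_removeLabels (tokens : List (List String)) (out : Option (List (List String)) × (Option (List (String × Int)))) : Prop := out = removeLabels_alt tokens
instance (tokens : List (List String)) (out : Option (List (List String)) × (Option (List (String × Int)))) : Decidable (Spec_removeLabels tokens out) := by unfold Spec_removeLabels; infer_instance

-- ===== CLAIM (what is proved, stated in full; the proofs are below) =====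
def Claim_equal_removeLabels : Prop := ∀ (tokens : List (List String)), Dom_removeLabels tokens → Spec_removeLabels tokens (removeLabels tokens)

-- ===== LEMMAS AND PROOFS =====

-- size of one instruction (1 if its first token is "DB", else 2) and a list's total size
def szB (inst : List String) : Int :=
  if (PySem.List.pyGet? inst 0).getD "" ∈ ["DB"] then 1 else 2

def szSum (l : List (List String)) : Int := (l.map szB).sum

theorem szSum_nil : szSum [] = 0 := rfl

theorem szSum_append_singleton (l : List (List String)) (x : List String) :
    szSum (l ++ [x]) = szSum l + szB x := by
  simp [szSum]

-- collectB only appends to pending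
theorem collectB_pending_append (ts : List (List String)) :
    ∀ (I : List (List String)) (P : List (String × Nat)),
    collectB ts I P = (collectB ts I []).map (fun r => (r.1, P ++ r.2)) := by
  induction ts with
  | nil => intro I P; simp [collectB]
  | cons t rest ih =>
    intro I P
    simp only [collectB]
    split_ifs with h1 h2 h3
    · rfl
    · rw [ih _ (P ++ [_]), ih _ ([] ++ [_])]
      cases collectB rest (I ++ [PySem.List.slice t (some 2) none]) [] <;> simp
    · rw [ih _ (P ++ [_]), ih _ ([] ++ [_])]
      cases collectB rest I [] <;> simp
    · exact ih _ P

-- collectB only appends to instructions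
theorem collectB_instr_extends (ts : List (List String)) :
    ∀ (I : List (List String)) (P : List (String × Nat)) (I' : List (List String)) (P' : List (String × Nat)),
    collectB ts I P = some (I', P') → ∃ J, I' = I ++ J := by
  induction ts with
  | nil =>
    intro I P I' P' h
    simp [collectB] at h
    exact ⟨[], by simp [h.1]⟩
  | cons t rest ih =>
    intro I P I' P' h
    simp only [collectB] at h
    split_ifs at h with h1 h2 h3
    · obtain ⟨J, hJ⟩ := ih _ _ _ _ h
      exact ⟨_, by simpa using hJ⟩
    · exact ih _ _ _ _ h
    · obtain ⟨J, hJ⟩ := ih _ _ _ _ h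
      exact ⟨_, by simpa using hJ⟩

-- closed form of Source B's prefix-sum fold
theorem prefixB_fold (I : List (List String)) :
    ∀ (p : List Int) (c : Int),
    I.foldl (fun (s : List Int × Int) inst =>
      (s.1 ++ [s.2], s.2 + (if (PySem.List.pyGet? inst 0).getD "" ∈ ["DB"] then 1 else 2))) (p, c)
    = (p ++ (List.range I.length).map (fun j => c + szSum (I.take j)), c + szSum I) := by
  induction I with
  | nil => intro p c; simp [szSum]
  | cons a I ih =>
    intro p c
    simp only [List.foldl_cons]
    rw [ih]
    simp only [Prod.mk.injEq]
    constructor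
    · rw [List.length_cons, List.range_succ_eq_map]
      simp [List.map_map, Function.comp, szSum, szB, add_assoc]
    · simp [szSum, szB, add_assoc]

theorem prefixB_eq (I : List (List String)) :
    prefixB I = (List.range (I.length + 1)).map (fun j => szSum (I.take j)) := by
  simp only [prefixB, prefixB_fold I [] 0]
  rw [List.range_succ]
  simp [List.take_of_length_le (le_refl I.length)]

theorem prefixB_get (I : List (List String)) (i : Nat) (hi : i ≤ I.length) :
    (PySem.List.pyGet? (prefixB I) (i : Int)).getD 0 = szSum (I.take i) := by
  rw [PySem.List.pyGet?_natCast, prefixB_eq]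
  rw [List.getElem?_map]
  rw [List.getElem?_range (by omega)]
  rfl

-- every pending index recorded by collectB is at most the final instruction count
theorem collectB_idx_le (ts : List (List String)) :
    ∀ (I : List (List String)) (P : List (String × Nat)) (I' : List (List String)) (P' : List (String × Nat)),
    collectB ts I P = some (I', P') → (∀ x ∈ P, x.2 ≤ I.length) →
    ∀ x ∈ P', x.2 ≤ I'.length := by
  induction ts with
  | nil =>
    intro I P I' P' h hP
    simp [collectB] at h
    intro x hx
    rw [← h.1]
    exact hP x (h.2 ▸ hx)
  | cons t rest ih =>
    intro I P I' P' h hP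
    simp only [collectB] at h
    split_ifs at h with h1 h2 h3
    · refine ih _ _ _ _ h ?_
      intro x hx
      rcases List.mem_append.1 hx with hx | hx
      · have := hP x hx; simp; omega
      · simp at hx; simp [hx]
    · refine ih _ _ _ _ h ?_
      intro x hx
      rcases List.mem_append.1 hx with hx | hx
      · exact hP x hx
      · simp at hx; simp [hx]
    · refine ih _ _ _ _ h ?_
      intro x hx
      have := hP x hx; simp; omega

-- main invariant: A's loop equals collect-then-resolve with addresses written as szSum of a prefix
theorem mainLoop (ts : List (List String)) :
    ∀ (I : List (List String)) (L : PySem.Dict String Int),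
    removeLabelsLoopA ts (szSum I) I L =
      match collectB ts I [] with
      | none => (none, none)
      | some (I', P') =>
        (some I', some ((P'.foldl (fun d ni => d.insert ni.1 (szSum (I'.take ni.2))) L).items)) := by
  induction ts with
  | nil => intro I L; simp [removeLabelsLoopA, collectB]
  | cons t rest ih =>
    intro I L
    have hsz2 : szB (PySem.List.slice t (some 2) none)
        = (if (PySem.List.pyGet? t 2).getD "" ∈ ["DB"] then (1:Int) else 2) := by
      unfold szB
      congr 2
      rw [show (2:Int) = ((2:Nat):Int) from rfl, PySem.List.slice_from_natCast,
          PySem.List.pyGet?_natCast, PySem.List.pyGet?_zero, List.getElem?_drop]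
    have ht0 : PySem.List.slice t (some 0) none = t := by
      rw [PySem.List.slice_zero_start, PySem.List.slice_none_none]
    simp only [removeLabelsLoopA, collectB, ht0, List.nil_append]
    split_ifs with h1 h2 h3 hdb hdb0
    · rfl
    · -- labelled DB instruction
      rw [show szSum I + 1 = szSum (I ++ [PySem.List.slice t (some 2) none]) from by
            rw [szSum_append_singleton, hsz2]; simp [hdb]]
      rw [collectB_pending_append rest _ [((PySem.List.pyGet? t 0).getD "", I.length)], ih]
      cases hc : collectB rest (I ++ [PySem.List.slice t (some 2) none]) [] with
      | none => rfl
      | some r =>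
        obtain ⟨I2, P2⟩ := r
        obtain ⟨J, hJ⟩ := collectB_instr_extends rest _ _ _ _ hc
        simp only [Option.map_some, List.singleton_append, List.foldl_cons]
        rw [show I2.take I.length = I from by
              subst hJ; rw [List.append_assoc]; exact List.take_left]
    · -- labelled non-DB instruction
      rw [show szSum I + 2 = szSum (I ++ [PySem.List.slice t (some 2) none]) from by
            rw [szSum_append_singleton, hsz2]; simp [hdb]]
      rw [collectB_pending_append rest _ [((PySem.List.pyGet? t 0).getD "", I.length)], ih]
      cases hc : collectB rest (I ++ [PySem.List.slice t (some 2) none]) [] with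
      | none => rfl
      | some r =>
        obtain ⟨I2, P2⟩ := r
        obtain ⟨J, hJ⟩ := collectB_instr_extends rest _ _ _ _ hc
        simp only [Option.map_some, List.singleton_append, List.foldl_cons]
        rw [show I2.take I.length = I from by
              subst hJ; rw [List.append_assoc]; exact List.take_left]
    · -- bare label: recorded at the current address, no instruction
      rw [collectB_pending_append rest I [((PySem.List.pyGet? t 0).getD "", I.length)], ih]
      cases hc : collectB rest I [] with
      | none => rfl
      | some r =>
        obtain ⟨I2, P2⟩ := r
        obtain ⟨J, hJ⟩ := collectB_instr_extends rest _ _ _ _ hc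
        simp only [Option.map_some, List.singleton_append, List.foldl_cons]
        rw [show I2.take I.length = I from by subst hJ; exact List.take_left]
    · -- plain DB instruction
      rw [show szSum I + 1 = szSum (I ++ [t]) from by
            rw [szSum_append_singleton]; simp [szB, hdb0]]
      exact ih (I ++ [t]) L
    · -- plain non-DB instruction
      rw [show szSum I + 2 = szSum (I ++ [t]) from by
            rw [szSum_append_singleton]; simp [szB, hdb0]]
      exact ih (I ++ [t]) L

-- ===== VERDICT (by name: the statement is the Claim_ definition above) =====
theorem removeLabels_spec : Claim_equal_removeLabels := by
  intro tokens _
  unfold Spec_removeLabels removeLabels removeLabels_alt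
  have hm := mainLoop tokens [] PySem.Dict.empty
  rw [szSum_nil] at hm
  rw [hm]
  cases hc : collectB tokens [] [] with
  | none => rfl
  | some r =>
    obtain ⟨I', P'⟩ := r
    simp only []
    have hidx : ∀ x ∈ P', x.2 ≤ I'.length :=
      collectB_idx_le tokens [] [] I' P' hc (by simp)
    congr 2
    apply congrArg
    apply PySem.List.foldl_congr_mem
    intro d x hx
    rw [prefixB_get I' x.2 (hidx x hx)]
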